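-- pv_equiv track=rewrite | github.com/ayoubc/competitive-programming | online_judges/hackerrank/algorithms/math/the_chosen_one.py | solve
-- ===== SOURCE A (Python) =====
-- def gcd(a, b):
--     if b == 0:
--         return a
--     return gcd(b, a%b)
--
-- def solve(n, a):
--     if n == 1:
--         return a[0] + 1
--     ans = 0
--     gcd_left = list(range(n))
--     gcd_right = list(range(n))
--     gcd_left[0], gcd_right[n-1] = a[0], a[n-1]
--     for i in range(1, n):
--         gcd_left[i] = gcd(gcd_left[i-1], a[i])
--     for i in range(n-2, -1, -1):
--         gcd_right[i] = gcd(gcd_right[i+1], a[i])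
--
--     for i in range(n):
--         if i == 0:
--             d = gcd_right[1]
--         elif i == n-1:
--             d = gcd_left[n-2]
--         else:
--             d = gcd(gcd_left[i-1], gcd_right[i+1])
--         if a[i] % d != 0:
--             ans = d
--             break
--     return ans
-- ===== SOURCE B (Python) =====
-- def gcd(a, b):
--     if b == 0:
--         return a
--     return gcd(b, a % b)
--
-- def solve(n, a):
--     if n == 1:
--         return a[0] + 1
--     i = 0
--     while i != n:
--         g = 0
--         for j in range(i):
--             g = gcd(g, a[j])
--         h = 0
--         for j in range(n - 1, i, -1):
--             h = gcd(h, a[j])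
--         d = gcd(g, h)
--         if a[i] % d != 0:
--             return d
--         i += 1
--     return 0
-- ===== Notes on version B (the rewrite author's own statement) =====
-- stated objective: simpler
-- what changed: Drops the prefix/suffix gcd tables and the three-way index branch: a while-loop recomputes, for each index, the gcd of the prefix and of the suffix by direct index scans (keeping A's exact gcd association so signs match), returning at the first index whose element the excluded gcd does not divide.
import Mathlib
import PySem

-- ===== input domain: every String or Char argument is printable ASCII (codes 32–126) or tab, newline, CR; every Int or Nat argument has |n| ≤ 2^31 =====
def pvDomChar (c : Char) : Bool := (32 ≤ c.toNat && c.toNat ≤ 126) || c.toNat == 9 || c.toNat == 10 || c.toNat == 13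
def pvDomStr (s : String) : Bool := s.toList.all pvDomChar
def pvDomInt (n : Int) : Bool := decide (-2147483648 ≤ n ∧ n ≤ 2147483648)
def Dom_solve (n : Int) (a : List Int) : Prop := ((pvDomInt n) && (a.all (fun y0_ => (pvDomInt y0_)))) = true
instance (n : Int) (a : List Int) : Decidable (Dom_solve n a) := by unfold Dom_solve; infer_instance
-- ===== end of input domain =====

-- B drops A's prefix/suffix gcd tables and the three-way index branch: per index it refolds gcd over the
-- prefix and suffix index ranges (same gcd association as A, so values match exactly); simpler, not faster.


-- ===== PORT A =====
-- helper lemma the recursive gcd port cites for termination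
theorem pymod_natAbs_lt (a b : Int) (h : ¬ b = 0) :
    (PySem.Int.mod a b).natAbs < b.natAbs := by
  rcases lt_or_gt_of_ne h with hb | hb
  · have := PySem.Int.mod_neg_bounds a hb
    omega
  · have h1 := PySem.Int.mod_nonneg a hb
    have h2 := PySem.Int.mod_lt a hb
    omega

-- Python's recursive gcd(a, b) (Python % = PySem.Int.mod, sign of the divisor)
def pygcd (a b : Int) : Int :=
  if h : b = 0 then a else pygcd b (PySem.Int.mod a b)
termination_by b.natAbs
decreasing_by exact pymod_natAbs_lt a b h

-- the final 'for i in range(n): … break' loop of A (break = return d; fall-through returns ans = 0)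
def solveLoopA (n : Int) (a gl gr : List Int) : List Int → Int
  | [] => 0
  | i :: rest =>
    let d := if i = 0 then PySem.List.pyGetD gr 1 0
             else if i = n - 1 then PySem.List.pyGetD gl (n - 2) 0
             else pygcd (PySem.List.pyGetD gl (i - 1) 0) (PySem.List.pyGetD gr (i + 1) 0)
    if PySem.Int.mod (PySem.List.pyGetD a i 0) d ≠ 0 then d else solveLoopA n a gl gr rest

def solve (n : Int) (a : List Int) : Int :=
  if n = 1 then PySem.List.pyGetD a 0 0 + 1
  else
    let gl0 : List Int := PySem.List.pyRange 0 n 1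
    let gr0 : List Int := PySem.List.pyRange 0 n 1
    let gl1 := PySem.List.pySetD gl0 0 (PySem.List.pyGetD a 0 0)
    let gr1 := PySem.List.pySetD gr0 (n - 1) (PySem.List.pyGetD a (n - 1) 0)
    let gl := (PySem.List.pyRange 1 n 1).foldl
      (fun t i => PySem.List.pySetD t i
        (pygcd (PySem.List.pyGetD t (i - 1) 0) (PySem.List.pyGetD a i 0))) gl1
    let gr := (PySem.List.pyRange (n - 2) (-1) (-1)).foldl
      (fun t i => PySem.List.pySetD t i
        (pygcd (PySem.List.pyGetD t (i + 1) 0) (PySem.List.pyGetD a i 0))) gr1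
    solveLoopA n a gl gr (PySem.List.pyRange 0 n 1)

-- ===== PORT B =====
-- B's 'while i != n' loop: per index i, fold gcd over the prefix indices 0..i-1 and the
-- suffix indices n-1..i+1; the Nat fuel (n.toNat at entry) only makes the recursion total —
-- it runs out exactly when i reaches n, where the Python loop exits returning 0
def solveLoopB (n : Int) (a : List Int) : Nat → Int → Int
  | 0, _ => 0
  | fuel + 1, i =>
    if i = n then 0
    else
      let g := (PySem.List.pyRange 0 i 1).foldl (fun g j => pygcd g (PySem.List.pyGetD a j 0)) 0
      let h := (PySem.List.pyRange (n - 1) i (-1)).foldl (fun h j => pygcd h (PySem.List.pyGetD a j 0)) 0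
      let d := pygcd g h
      if PySem.Int.mod (PySem.List.pyGetD a i 0) d ≠ 0 then d else solveLoopB n a fuel (i + 1)

def solve_alt (n : Int) (a : List Int) : Int :=
  if n = 1 then PySem.List.pyGetD a 0 0 + 1
  else solveLoopB n a n.toNat 0

-- ===== PRECONDITION & SPEC =====
-- Pre_ excludes exactly the inputs where Python A raises: n outside 1..len(a) (IndexError on the
-- table setup / a[0]), and n ≥ 2 with fewer than two nonzero elements among a[:n], where the
-- excluded gcd d is 0 and 'a[i] % 0' raises ZeroDivisionError (B raises there too).
def Pre_solve (n : Int) (a : List Int) : Prop :=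
  1 ≤ n ∧ n ≤ a.length ∧
    (n = 1 ∨ 2 ≤ (((a.take n.toNat).filter (fun x => decide (x ≠ 0))).length : Int))
instance (n : Int) (a : List Int) : Decidable (Pre_solve n a) := by unfold Pre_solve; infer_instance

def pvWitness_solve : Int × List Int := (3, [4, 6, 5])

def Spec_solve (n : Int) (a : List Int) (out : Int) : Prop := out = solve_alt n a
instance (n : Int) (a : List Int) (out : Int) : Decidable (Spec_solve n a out) := by unfold Spec_solve; infer_instance

-- ===== CLAIM (what is proved, stated in full; the proofs are below) =====
def Claim_equal_solve : Prop := ∀ (n : Int) (a : List Int), Dom_solve n a → Pre_solve n a → Spec_solve n a (solve n a)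

-- ===== LEMMAS AND PROOFS =====

theorem pygcd_zero_right (x : Int) : pygcd x 0 = x := by
  rw [pygcd]; simp

theorem pygcd_zero_left (x : Int) : pygcd 0 x = x := by
  by_cases hx : x = 0
  · simp [hx, pygcd_zero_right]
  · rw [pygcd]
    have h0 : PySem.Int.mod 0 x = 0 := (PySem.Int.mod_eq_zero_iff_dvd 0 x).mpr (dvd_zero x)
    simp [hx, h0, pygcd_zero_right]

-- left gcd chain and right gcd chain (both with A's argument order gcd(acc, elem))
def lch (xs : List Int) : Int := xs.foldl pygcd 0
def rch (xs : List Int) : Int := xs.reverse.foldl pygcd 0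

theorem lch_append (xs : List Int) (x : Int) : lch (xs ++ [x]) = pygcd (lch xs) x := by
  simp [lch]

theorem rch_cons (x : Int) (xs : List Int) : rch (x :: xs) = pygcd (rch xs) x := by
  simp [rch]

-- gl table spec: after processing range(1, m), entries 0..m-1 hold the left gcd chains
theorem gl_upto (a : List Int) (n : Int) (hn2 : 2 ≤ n) (hna : n ≤ a.length)
    (m : Nat) (h1 : 1 ≤ m) (hm : (m : Int) ≤ n) :
    (((PySem.List.pyRange 1 (m : Int) 1).foldl
        (fun t i => PySem.List.pySetD t i
          (pygcd (PySem.List.pyGetD t (i - 1) 0) (PySem.List.pyGetD a i 0)))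
        (PySem.List.pySetD (PySem.List.pyRange 0 n 1) 0 (PySem.List.pyGetD a 0 0))).length = n.toNat)
    ∧ ∀ k : Nat, k < m →
      ((PySem.List.pyRange 1 (m : Int) 1).foldl
        (fun t i => PySem.List.pySetD t i
          (pygcd (PySem.List.pyGetD t (i - 1) 0) (PySem.List.pyGetD a i 0)))
        (PySem.List.pySetD (PySem.List.pyRange 0 n 1) 0 (PySem.List.pyGetD a 0 0))).getD k 0
        = lch (a.take (k + 1)) := by
  induction m with
  | zero => omega
  | succ m ih =>
    by_cases hm0 : m = 0
    · subst hm0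
      rw [show ((1:Nat) : Int) = 1 by norm_num, PySem.List.pyRange_one_eq_nil le_rfl]
      simp only [List.foldl_nil]
      have hlen : (PySem.List.pySetD (PySem.List.pyRange 0 n 1) 0 (PySem.List.pyGetD a 0 0)).length = n.toNat := by
        rw [show (0:Int) = ((0:Nat):Int) by norm_num, PySem.List.pySetD_natCast]
        simp [PySem.List.length_pyRange_one]
      refine ⟨hlen, ?_⟩
      intro k hk
      interval_cases k
      have h0 : 0 < a.length := by omega
      have h0' : 0 < (PySem.List.pyRange 0 n 1).length := by
        simp [PySem.List.length_pyRange_one]; omega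
      rw [PySem.List.pySetD_of_nonneg]
      · rw [List.getD, Int.toNat_zero, List.getElem?_set_self (by simpa using h0')]
        rcases a with _ | ⟨x, xs⟩
        · simp at h0
        · simp [PySem.List.pyGetD_zero, lch, pygcd_zero_left]
      · norm_num
    · have h1m : 1 ≤ m := by omega
      have hmn : (m : Int) ≤ n := by push_cast at hm ⊢; omega
      obtain ⟨ihlen, ihk⟩ := ih h1m hmn
      have hsplit : PySem.List.pyRange 1 ((m+1 : Nat) : Int) 1
          = PySem.List.pyRange 1 (m : Int) 1 ++ [(m : Int)] := by
        push_cast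
        exact PySem.List.pyRange_one_succ_right (by exact_mod_cast h1m)
      rw [hsplit, List.foldl_append]
      simp only [List.foldl_cons, List.foldl_nil]
      set t := (PySem.List.pyRange 1 (m : Int) 1).foldl
        (fun t i => PySem.List.pySetD t i
          (pygcd (PySem.List.pyGetD t (i - 1) 0) (PySem.List.pyGetD a i 0)))
        (PySem.List.pySetD (PySem.List.pyRange 0 n 1) 0 (PySem.List.pyGetD a 0 0)) with ht
      have hmlt : m < n.toNat := by omega
      have hmlta : m < a.length := by omega
      have hgd : PySem.List.pyGetD t ((m:Int) - 1) 0 = lch (a.take m) := by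
        rw [show ((m:Int) - 1) = ((m - 1 : Nat) : Int) by omega]
        rw [PySem.List.pyGetD_natCast]
        rw [ihk (m-1) (by omega), Nat.sub_add_cancel h1m]
      have hga : PySem.List.pyGetD a (m:Int) 0 = a[m] := by
        rw [PySem.List.pyGetD_natCast, List.getD_eq_getElem a 0 hmlta]
      rw [hgd, hga, PySem.List.pySetD_natCast]
      constructor
      · simp [ihlen]
      · intro k hk
        by_cases hkm : k = m
        · subst hkm
          have : k < t.length := by omega
          simp [List.getD, this]
          rw [List.take_succ_eq_append_getElem hmlta, lch_append]
        · rw [show (t.set m (pygcd (lch (a.take m)) a[m])).getD k 0 = t.getD k 0 by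
            simp [List.getD, List.getElem?_set_ne (by omega : m ≠ k)]]
          exact ihk k (by omega)

-- gr table spec, by downward induction over the countdown range
theorem gr_down (a : List Int) (n : Int) (hn2 : 2 ≤ n) (hna : n ≤ a.length) :
    ∀ (p : Nat) (t : List Int), (p : Int) ≤ n - 1 → t.length = n.toNat →
      (∀ k : Nat, p ≤ k → k < n.toNat → t.getD k 0 = rch ((a.take n.toNat).drop k)) →
      ∀ k : Nat, k < n.toNat →
        ((PySem.List.pyRange ((p : Int) - 1) (-1) (-1)).foldl
          (fun t i => PySem.List.pySetD t i
            (pygcd (PySem.List.pyGetD t (i + 1) 0) (PySem.List.pyGetD a i 0))) t).getD k 0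
          = rch ((a.take n.toNat).drop k) := by
  intro p
  induction p with
  | zero =>
    intro t hp hlen hinv k hk
    rw [show ((0:Nat):Int) - 1 = (-1:Int) by norm_num,
      PySem.List.pyRange_neg_one_eq_nil le_rfl]
    exact hinv k (Nat.zero_le k) hk
  | succ p ih =>
    intro t hp hlen hinv k hk
    have hpn : p + 1 < n.toNat := by omega
    have hpa : p < a.length := by omega
    rw [show (((p+1:Nat):Int) - 1) = ((p:Nat):Int) by push_cast; ring]
    rw [PySem.List.pyRange_neg_one_cons (by omega : (-1:Int) < ((p:Nat):Int))]
    simp only [List.foldl_cons]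
    have hga : PySem.List.pyGetD a ((p:Nat):Int) 0 = a[p] := by
      rw [PySem.List.pyGetD_natCast, List.getD_eq_getElem a 0 hpa]
    have hgt : PySem.List.pyGetD t (((p:Nat):Int) + 1) 0
        = rch ((a.take n.toNat).drop (p+1)) := by
      rw [show (((p:Nat):Int) + 1) = (((p+1:Nat)):Int) by push_cast; ring,
        PySem.List.pyGetD_natCast]
      exact hinv (p+1) le_rfl hpn
    rw [PySem.List.pySetD_natCast, hga, hgt]
    refine ih (t.set p _) (by push_cast at hp ⊢; omega) (by simp [hlen]) ?_ k hk
    intro j hj hjn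
    by_cases hjp : j = p
    · subst hjp
      rw [List.getD, List.getElem?_set_self (by omega), Option.getD_some]
      have hdrop : (a.take n.toNat).drop j
          = (a.take n.toNat)[j]'(by simp; omega) :: (a.take n.toNat).drop (j+1) :=
        List.drop_eq_getElem_cons (by simp; omega)
      rw [hdrop, rch_cons, List.getElem_take]
    · rw [show (t.set p (pygcd (rch ((a.take n.toNat).drop (p+1))) a[p])).getD j 0
          = t.getD j 0 from by simp [List.getD, List.getElem?_set_ne (by omega : p ≠ j)]]
      exact hinv j (by omega) hjn

-- the two loops agree whenever the per-index d values agree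
theorem loops_eq (n : Int) (a gl gr : List Int)
    (hd : ∀ i : Int, 0 ≤ i → i < n →
      (if i = 0 then PySem.List.pyGetD gr 1 0
       else if i = n - 1 then PySem.List.pyGetD gl (n - 2) 0
       else pygcd (PySem.List.pyGetD gl (i - 1) 0) (PySem.List.pyGetD gr (i + 1) 0))
      = pygcd ((PySem.List.pyRange 0 i 1).foldl (fun g j => pygcd g (PySem.List.pyGetD a j 0)) 0)
          ((PySem.List.pyRange (n - 1) i (-1)).foldl (fun h j => pygcd h (PySem.List.pyGetD a j 0)) 0)) :
    ∀ (fuel : Nat) (i : Int), 0 ≤ i → i + fuel = n →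
      solveLoopA n a gl gr (PySem.List.pyRange i n 1) = solveLoopB n a fuel i := by
  intro fuel
  induction fuel with
  | zero =>
    intro i hi0 hin
    rw [PySem.List.pyRange_one_eq_nil (by omega)]
    rfl
  | succ fuel ih =>
    intro i hi0 hin
    have hilt : i < n := by omega
    rw [PySem.List.pyRange_one_cons hilt, solveLoopA, solveLoopB, if_neg (show ¬ (i = n) by omega)]
    simp only [← hd i hi0 hilt]
    exact if_congr Iff.rfl rfl (ih (i + 1) (by omega) (by omega))

-- B's prefix index fold is the left gcd chain of a[:m]
theorem foldl_idx_lch (a : List Int) (m : Nat) (hm : m ≤ a.length) :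
    (PySem.List.pyRange 0 ((m : Nat) : Int) 1).foldl
      (fun g j => pygcd g (PySem.List.pyGetD a j 0)) 0 = lch (a.take m) := by
  have h1 : PySem.List.len (a.take m) = ((m : Nat) : Int) := by
    rw [PySem.List.len_eq]; simp; omega
  conv_lhs => rw [← h1]
  rw [PySem.List.foldl_congr_mem _ _ (fun g j => pygcd g (PySem.List.pyGetD (a.take m) j 0)) _
    (by
      intro acc j hj
      rw [h1, PySem.List.mem_pyRange_one] at hj
      show pygcd acc (PySem.List.pyGetD a j 0) = pygcd acc (PySem.List.pyGetD (a.take m) j 0)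
      rw [PySem.List.pyGetD_of_nonneg _ 0 hj.1, PySem.List.pyGetD_of_nonneg _ 0 hj.1,
        List.getD, List.getD, List.getElem?_take_of_lt (by omega)])]
  exact PySem.List.foldl_pyRange_zero_pyGetD (a.take m) 0 pygcd 0

-- B's suffix countdown fold is the right gcd chain of b[i+1:]
theorem foldl_idx_rch (b : List Int) (i : Int) (hi : 0 ≤ i) :
    (PySem.List.pyRange (PySem.List.len b - 1) i (-1)).foldl
      (fun h j => pygcd h (PySem.List.pyGetD b j 0)) 0 = rch (b.drop (i + 1).toNat) := by
  rw [show PySem.List.pyRange (PySem.List.len b - 1) i (-1)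
        = (PySem.List.pyRange (i + 1) (PySem.List.len b) 1).reverse from by
      rw [PySem.List.pyRange_neg_one_eq_reverse]; norm_num]
  rw [show (fun (h : Int) (j : Int) => pygcd h (PySem.List.pyGetD b j 0))
        = (fun (h : Int) (j : Int) => pygcd h ((fun j => PySem.List.pyGetD b j 0) j)) from rfl,
    ← List.foldl_map, List.map_reverse,
    PySem.List.map_pyGetD_pyRange b 0 (by omega)]
  rfl

-- per-index d values of A (table lookups) and B (index-range folds) coincide
theorem dvals_eq (n : Int) (a : List Int) (hn2 : 2 ≤ n) (hna : n ≤ (a.length : Int))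
    (gl gr : List Int)
    (hgl : ∀ k : Nat, k < n.toNat → gl.getD k 0 = lch (a.take (k + 1)))
    (hgr : ∀ k : Nat, k < n.toNat → gr.getD k 0 = rch ((a.take n.toNat).drop k)) :
    ∀ i : Int, 0 ≤ i → i < n →
      (if i = 0 then PySem.List.pyGetD gr 1 0
       else if i = n - 1 then PySem.List.pyGetD gl (n - 2) 0
       else pygcd (PySem.List.pyGetD gl (i - 1) 0) (PySem.List.pyGetD gr (i + 1) 0))
      = pygcd ((PySem.List.pyRange 0 i 1).foldl (fun g j => pygcd g (PySem.List.pyGetD a j 0)) 0)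
          ((PySem.List.pyRange (n - 1) i (-1)).foldl (fun h j => pygcd h (PySem.List.pyGetD a j 0)) 0) := by
  intro i hi0 hin
  have hBg : (PySem.List.pyRange 0 i 1).foldl (fun g j => pygcd g (PySem.List.pyGetD a j 0)) 0
      = lch (a.take i.toNat) := by
    rw [show i = ((i.toNat : Nat) : Int) by omega]
    exact foldl_idx_lch a i.toNat (by omega)
  have hBh : (PySem.List.pyRange (n - 1) i (-1)).foldl (fun h j => pygcd h (PySem.List.pyGetD a j 0)) 0
      = rch ((a.take n.toNat).drop (i + 1).toNat) := by
    have hlen : PySem.List.len (a.take n.toNat) = n := by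
      rw [PySem.List.len_eq]; simp; omega
    rw [PySem.List.foldl_congr_mem _ _ (fun h j => pygcd h (PySem.List.pyGetD (a.take n.toNat) j 0)) _
      (by
        intro acc j hj
        rw [PySem.List.mem_pyRange_neg_one] at hj
        show pygcd acc (PySem.List.pyGetD a j 0) = pygcd acc (PySem.List.pyGetD (a.take n.toNat) j 0)
        rw [PySem.List.pyGetD_of_nonneg _ 0 (by omega), PySem.List.pyGetD_of_nonneg _ 0 (by omega),
          List.getD, List.getD, List.getElem?_take_of_lt (by omega)])]
    rw [show n - 1 = PySem.List.len (a.take n.toNat) - 1 by rw [hlen]]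
    exact foldl_idx_rch (a.take n.toNat) i hi0
  rw [hBg, hBh]
  by_cases h0 : i = 0
  · subst h0
    rw [if_pos rfl,
      show (1 : Int) = ((1 : Nat) : Int) by norm_num,
      PySem.List.pyGetD_of_nonneg gr 0 (by omega), Int.toNat_natCast,
      hgr 1 (by omega)]
    simp [lch, pygcd_zero_left]
  · by_cases h1 : i = n - 1
    · subst h1
      rw [if_neg h0, if_pos rfl,
        PySem.List.pyGetD_of_nonneg gl 0 (by omega),
        hgl (n - 2).toNat (by omega),
        show (n - 2).toNat + 1 = (n - 1).toNat by omega]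
      have hdrop : (a.take n.toNat).drop (n - 1 + 1).toNat = [] := by
        apply List.drop_eq_nil_of_le
        simp
      rw [hdrop]
      rw [show rch [] = 0 from rfl, pygcd_zero_right]
    · rw [if_neg h0, if_neg h1,
        PySem.List.pyGetD_of_nonneg gl 0 (by omega),
        PySem.List.pyGetD_of_nonneg gr 0 (by omega),
        hgl (i - 1).toNat (by omega),
        hgr (i + 1).toNat (by omega),
        show (i - 1).toNat + 1 = i.toNat by omega]

-- ===== VERDICT (by name: the statement is the Claim_ definition above) =====
theorem solve_spec : Claim_equal_solve := by
  intro n a _hdom hpre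
  obtain ⟨h1n, hna, _⟩ := hpre
  unfold Spec_solve
  by_cases hn1 : n = 1
  · simp [solve, solve_alt, hn1]
  · have hn2 : 2 ≤ n := by omega
    rw [solve, solve_alt, if_neg hn1, if_neg hn1]
    have hglspec := gl_upto a n hn2 hna n.toNat (by omega) (by omega)
    have hgl : ∀ k : Nat, k < n.toNat →
        ((PySem.List.pyRange 1 n 1).foldl
          (fun t i => PySem.List.pySetD t i
            (pygcd (PySem.List.pyGetD t (i - 1) 0) (PySem.List.pyGetD a i 0)))
          (PySem.List.pySetD (PySem.List.pyRange 0 n 1) 0 (PySem.List.pyGetD a 0 0))).getD k 0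
          = lch (a.take (k + 1)) := by
      have hcast : ((n.toNat : Nat) : Int) = n := by omega
      rw [hcast] at hglspec
      exact hglspec.2
    have hinv0 : ∀ k : Nat, (n - 1).toNat ≤ k → k < n.toNat →
        (PySem.List.pySetD (PySem.List.pyRange 0 n 1) (n - 1)
          (PySem.List.pyGetD a (n - 1) 0)).getD k 0 = rch ((a.take n.toNat).drop k) := by
      intro k hk1 hk2
      have hkn : k = n.toNat - 1 := by omega
      subst hkn
      have hlen : (PySem.List.pyRange 0 n 1).length = n.toNat := by
        simp [PySem.List.length_pyRange_one]
      rw [PySem.List.pySetD_of_nonneg (h := by omega)]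
      rw [List.getD, show (n - 1).toNat = n.toNat - 1 by omega,
        List.getElem?_set_self (by omega), Option.getD_some]
      have hdrop : (a.take n.toNat).drop (n.toNat - 1)
          = [(a.take n.toNat)[n.toNat - 1]'(by simp; omega)] := by
        rw [List.drop_eq_getElem_cons (by simp; omega)]
        congr 1
        apply List.drop_eq_nil_of_le
        simp; omega
      rw [hdrop, List.getElem_take,
        PySem.List.pyGetD_of_nonneg a 0 (by omega),
        List.getD_eq_getElem a 0 (by omega)]
      rw [show rch [a[n.toNat - 1]'(by omega)] = pygcd (rch []) (a[n.toNat - 1]'(by omega)) from rch_cons _ _,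
        show rch [] = 0 from rfl, pygcd_zero_left]
      congr 1
      omega
    have hgr := gr_down a n hn2 hna (n - 1).toNat
      (PySem.List.pySetD (PySem.List.pyRange 0 n 1) (n - 1) (PySem.List.pyGetD a (n - 1) 0))
      (by omega)
      (by rw [PySem.List.pySetD_of_nonneg (h := by omega)]
          simp [PySem.List.length_pyRange_one])
      hinv0
    have hcast2 : (((n - 1).toNat : Nat) : Int) - 1 = n - 2 := by omega
    rw [hcast2] at hgr
    have := loops_eq n a _ _ (dvals_eq n a hn2 hna _ _ hgl (fun k hk => hgr k hk)) n.toNat 0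
      le_rfl (by omega)
    rw [show (0 : Int) = ((0:Nat) : Int) by norm_num] at this
    exact this
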